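-- pv_equiv track=rewrite | github.com/MihaiBalint/dfsync | dfsync/distribution.py | _read_editable_location_from_pip_show_output
-- ===== SOURCE A (Python) =====
-- from typing import Optional
--
-- def _read_editable_location_from_pip_show_output(out: str) -> Optional[str]:
--     editable_label = "Editable project location: "
--     site_packages_label = "site-packages"
--     site_packages_lines = []
--
--     for line in out.split("\n"):
--         if line.startswith("Location: "):
--             continue
--         if line.startswith(editable_label):
--             return line[len(editable_label) :].strip()
--         if site_packages_label in line:
--             site_packages_lines.append(line)
--
--     return "UNKNOWN-EDITABLE-LOCATION" if len(site_packages_lines) > 0 else None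
-- ===== SOURCE B (Python) =====
-- from typing import Optional
--
-- def _read_editable_location_from_pip_show_output(out: str) -> Optional[str]:
--     editable_label = "Editable project location: "
--     lines = out.split("\n")
--     for line in lines:
--         if line.startswith(editable_label):
--             return line[len(editable_label):].strip()
--     has_sp = any(
--         "site-packages" in line
--         for line in lines
--         if not line.startswith("Location: ")
--     )
--     return "UNKNOWN-EDITABLE-LOCATION" if has_sp else None
-- ===== Notes on version B (the rewrite author's own statement) =====
-- stated objective: simpler
-- what changed: Replaces A's single pass that accumulates a list of site-packages lines with a two-pass decomposition: a first short-circuiting scan for the editable line, then an any() over the remaining non-location lines; no list is built.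
import Mathlib
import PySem

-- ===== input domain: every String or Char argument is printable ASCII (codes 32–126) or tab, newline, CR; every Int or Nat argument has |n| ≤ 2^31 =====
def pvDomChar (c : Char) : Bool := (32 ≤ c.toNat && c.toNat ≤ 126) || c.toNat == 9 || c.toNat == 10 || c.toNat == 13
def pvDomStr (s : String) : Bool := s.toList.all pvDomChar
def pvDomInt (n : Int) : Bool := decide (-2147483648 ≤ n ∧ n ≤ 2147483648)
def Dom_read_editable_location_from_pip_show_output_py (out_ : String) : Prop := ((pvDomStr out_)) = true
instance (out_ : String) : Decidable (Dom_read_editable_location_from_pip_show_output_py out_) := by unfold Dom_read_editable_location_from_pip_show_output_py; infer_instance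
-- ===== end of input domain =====

-- B replaces A's single accumulating pass by a two-pass decomposition (find the editable line,
-- then an any-check over the remaining lines) for simplicity; same O(n) cost.

-- ===== PORT A =====
-- the constants of the Python source, as code-point lists
def pvEditableLabel : List Char := "Editable project location: ".toList
def pvLocationLabel : List Char := "Location: ".toList
def pvSitePackagesLabel : List Char := "site-packages".toList

-- A's for-loop: state = site_packages_lines accumulator; early return on the editable line
def pvLoopA : List (List Char) → List (List Char) → Option String
  | [], acc => if acc.length > 0 then some "UNKNOWN-EDITABLE-LOCATION" else none
  | line :: rest, acc =>
    if PySem.Chars.startswith line pvLocationLabel then pvLoopA rest acc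
    else if PySem.Chars.startswith line pvEditableLabel then
      some (String.ofList (PySem.Chars.strip
        (PySem.Chars.slice line (some (PySem.Chars.len pvEditableLabel)) none)))
    else if PySem.Chars.isIn pvSitePackagesLabel line then pvLoopA rest (acc ++ [line])
    else pvLoopA rest acc

def read_editable_location_from_pip_show_output_py (out_ : String) : Option String :=
  pvLoopA (PySem.Chars.splitOn out_.toList ['\n']) []

-- ===== PORT B =====
-- first pass of Source B: return the first editable line's payload, stripped
def pvFindEditable : List (List Char) → Option String
  | [] => none
  | line :: rest =>
    if PySem.Chars.startswith line pvEditableLabel then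
      some (String.ofList (PySem.Chars.strip
        (PySem.Chars.slice line (some (PySem.Chars.len pvEditableLabel)) none)))
    else pvFindEditable rest

def read_editable_location_from_pip_show_output_py_alt (out_ : String) : Option String :=
  let lines := PySem.Chars.splitOn out_.toList ['\n']
  match pvFindEditable lines with
  | some v => some v
  | none =>
    if lines.any (fun line =>
        !(PySem.Chars.startswith line pvLocationLabel)
          && PySem.Chars.isIn pvSitePackagesLabel line)
    then some "UNKNOWN-EDITABLE-LOCATION" else none

-- ===== PRECONDITION & SPEC =====
def Spec_read_editable_location_from_pip_show_output_py (out_ : String) (out : Option String) : Prop := out = read_editable_location_from_pip_show_output_py_alt out_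
instance (out_ : String) (out : Option String) : Decidable (Spec_read_editable_location_from_pip_show_output_py out_ out) := by unfold Spec_read_editable_location_from_pip_show_output_py; infer_instance

-- ===== CLAIM (what is proved, stated in full; the proofs are below) =====
def Claim_equal_read_editable_location_from_pip_show_output_py : Prop := ∀ (out_ : String), Dom_read_editable_location_from_pip_show_output_py out_ → Spec_read_editable_location_from_pip_show_output_py out_ (read_editable_location_from_pip_show_output_py out_)

-- ===== LEMMAS AND PROOFS =====

-- a "Location: " line is never an "Editable project location: " line (the prefixes differ at char 0)
lemma pv_loc_not_edit (line : List Char)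
    (h : PySem.Chars.startswith line pvLocationLabel = true) :
    PySem.Chars.startswith line pvEditableLabel = false := by
  rw [PySem.Chars.startswith_iff] at h
  by_contra hb
  rw [Bool.not_eq_false, PySem.Chars.startswith_iff] at hb
  obtain ⟨t1, e1⟩ := h
  obtain ⟨t2, e2⟩ := hb
  rw [← e1] at e2
  have hL : pvLocationLabel = 'L' :: "ocation: ".toList := rfl
  have hE : pvEditableLabel = 'E' :: "ditable project location: ".toList := rfl
  rw [hL, hE] at e2
  simp at e2

-- A's loop equals B's two-pass decomposition, for any accumulator contents
lemma pvLoopA_eq (lines : List (List Char)) (acc : List (List Char)) :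
    pvLoopA lines acc =
      match pvFindEditable lines with
      | some v => some v
      | none =>
        if acc.length > 0 || lines.any (fun line =>
            !(PySem.Chars.startswith line pvLocationLabel)
              && PySem.Chars.isIn pvSitePackagesLabel line)
        then some "UNKNOWN-EDITABLE-LOCATION" else none := by
  induction lines generalizing acc with
  | nil => simp [pvLoopA, pvFindEditable]
  | cons line rest ih =>
    by_cases hloc : PySem.Chars.startswith line pvLocationLabel = true
    · have hed := pv_loc_not_edit line hloc
      simp [pvLoopA, pvFindEditable, hloc, hed, ih]
    · simp only [Bool.not_eq_true] at hloc
      by_cases hed : PySem.Chars.startswith line pvEditableLabel = true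
      · simp [pvLoopA, pvFindEditable, hloc, hed]
      · simp only [Bool.not_eq_true] at hed
        by_cases hsp : PySem.Chars.isIn pvSitePackagesLabel line = true
        · simp [pvLoopA, pvFindEditable, hloc, hed, hsp, ih]
        · simp only [Bool.not_eq_true] at hsp
          simp [pvLoopA, pvFindEditable, hloc, hed, hsp, ih]

-- ===== VERDICT (by name: the statement is the Claim_ definition above) =====
theorem read_editable_location_from_pip_show_output_py_spec : Claim_equal_read_editable_location_from_pip_show_output_py := by
  intro out_ _
  unfold Spec_read_editable_location_from_pip_show_output_py
  unfold read_editable_location_from_pip_show_output_py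
  unfold read_editable_location_from_pip_show_output_py_alt
  rw [pvLoopA_eq]
  simp
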